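-- pv_equiv track=rewrite | github.com/DevPradhan-040929/steganography_reverse_lsb | backend/stego_engine.py | binary_to_text
-- ===== SOURCE A (Python) =====
-- def binary_to_text(binary):
--     chars = [binary[i:i+8] for i in range(0, len(binary), 8)]
--     message = ''
--     for char in chars:
--         if char == '11111111':
--             break
--         message += chr(int(char, 2))
--     return message
-- ===== SOURCE B (Python) =====
-- def binary_to_text(binary):
--     out = []
--     acc = 0
--     nbits = 0
--     for ch in binary:
--         if ch != '0' and ch != '1':
--             raise ValueError(f"non-binary digit {ch!r}")
--         acc = acc * 2 + (1 if ch == '1' else 0)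
--         nbits += 1
--         if nbits == 8:
--             if acc == 255:
--                 return ''.join(out)
--             out.append(chr(acc))
--             acc = 0
--             nbits = 0
--     if nbits:
--         out.append(chr(acc))
--     return ''.join(out)
-- ===== Notes on version B (the rewrite author's own statement) =====
-- stated objective: alternative
-- what changed: B is a single-pass bit-level state machine: it folds the characters into an integer accumulator with a bit counter and emits chr(acc) every 8 bits (stopping when the accumulated byte is 255), instead of A's building a list of 8-character substring chunks and converting each with int(chunk, 2).
-- outside the precondition, e.g. on binary_to_text('1_000000'): A returns '@', B raises ValueError; on binary_to_text('-0'): A returns '\x00', B raises ValueError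
import Mathlib
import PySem

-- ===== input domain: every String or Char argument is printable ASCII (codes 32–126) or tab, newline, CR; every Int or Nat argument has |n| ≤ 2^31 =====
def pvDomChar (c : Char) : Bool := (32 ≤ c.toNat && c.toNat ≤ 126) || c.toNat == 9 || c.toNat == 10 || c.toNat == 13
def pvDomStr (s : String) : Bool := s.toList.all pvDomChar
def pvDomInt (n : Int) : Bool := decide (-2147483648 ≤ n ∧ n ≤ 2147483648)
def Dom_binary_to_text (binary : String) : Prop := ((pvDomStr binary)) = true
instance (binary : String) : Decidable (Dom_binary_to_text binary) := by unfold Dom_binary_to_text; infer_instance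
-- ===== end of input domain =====

-- B replaces A's list of 8-character substring chunks (each converted with int(chunk, 2))
-- by a single-pass bit-level state machine: an integer accumulator and a bit counter,
-- emitting a character every 8 bits and stopping when the accumulated byte is 255 (alternative; same cost).

-- ===== PORT A =====
def pvTerm : List Char := ['1','1','1','1','1','1','1','1']

-- the for-loop of A: message accumulator, break on the terminator chunk
def pvLoopA : List (List Char) → List Char → List Char
  | [], message => message
  | c :: rest, message =>
    if c = pvTerm then message
    else pvLoopA rest (message ++ [Char.ofNat ((PySem.Int.ofCharsBase? c 2).getD 0).toNat])

def binary_to_text (binary : String) : String :=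
  let cs := binary.toList
  let chars : List (List Char) :=
    (PySem.List.pyRange 0 cs.length 8).map (fun i => PySem.List.slice cs (some i) (some (i + 8)))
  String.ofList (pvLoopA chars [])

-- ===== PORT B =====
def pvBit (c : Char) : Nat := if c = '1' then 1 else 0

-- the for-loop of B: byte accumulator acc, bit counter nbits, output list out;
-- early return when a full byte equals 255, final flush of a partial byte.
-- B's Python raises ValueError on a character that is not a binary digit (Pre_ excludes
-- exactly those inputs); there the port reads the character as a 0 bit.
def pvLoopB : List Char → Nat → Nat → List Char → List Char
  | [], acc, nbits, out => if nbits ≠ 0 then out ++ [Char.ofNat acc] else out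
  | ch :: rest, acc, nbits, out =>
    if nbits + 1 = 8 then
      (if acc * 2 + pvBit ch = 255 then out
       else pvLoopB rest 0 0 (out ++ [Char.ofNat (acc * 2 + pvBit ch)]))
    else pvLoopB rest (acc * 2 + pvBit ch) (nbits + 1) out

def binary_to_text_alt (binary : String) : String :=
  String.ofList (pvLoopB binary.toList 0 0 [])

-- ===== PRECONDITION & SPEC =====
-- Pre_ excludes strings in which some aligned 8-character chunk strictly before the first
-- terminator chunk (eight 1s) contains a character that is not a binary digit: on almost all of those
-- A raises ValueError from int(chunk, 2), and on the few where int()'s tolerance (sign/space/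
-- underscore inside a chunk) still lets A return, B's digit validation raises ValueError instead.
def Pre_binary_to_text (binary : String) : Prop :=
  ((((PySem.List.pyRange 0 (binary.toList.length : Int) 8).map
      (fun i => PySem.List.slice binary.toList (some i) (some (i + 8)))).takeWhile
      (fun c => c ≠ ['1','1','1','1','1','1','1','1'])).all
    (fun c => c.all (fun x => x == '0' || x == '1'))) = true
instance (binary : String) : Decidable (Pre_binary_to_text binary) := by
  unfold Pre_binary_to_text; infer_instance

def pvWitness_binary_to_text : String := "0100100011111111"

def Spec_binary_to_text (binary : String) (out : String) : Prop := out = binary_to_text_alt binary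
instance (binary : String) (out : String) : Decidable (Spec_binary_to_text binary out) := by
  unfold Spec_binary_to_text; infer_instance

-- ===== CLAIM (what is proved, stated in full; the proofs are below) =====
def Claim_equal_binary_to_text : Prop := ∀ (binary : String), Dom_binary_to_text binary → Pre_binary_to_text binary → Spec_binary_to_text binary (binary_to_text binary)

-- ===== LEMMAS AND PROOFS =====

-- proof-side vocabulary: bit value of a chunk, A's per-chunk decode, A's chunking
def pvPB (acc : Nat) (cs : List Char) : Nat := cs.foldl (fun a c => a * 2 + pvBit c) acc

def pvDecA (c : List Char) : Char := Char.ofNat ((PySem.Int.ofCharsBase? c 2).getD 0).toNat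

def pvChunkList : List Char → List (List Char)
  | [] => []
  | c :: cs => ((c :: cs).take 8) :: pvChunkList ((c :: cs).drop 8)
  termination_by l => l.length
  decreasing_by simp

-- result of B's loop from an arbitrary mid-byte state, without the output accumulator
def pvDec : Nat → Nat → List Char → List Char
  | acc, nbits, [] => if nbits ≠ 0 then [Char.ofNat acc] else []
  | acc, nbits, ch :: rest =>
    if nbits + 1 = 8 then
      (if acc * 2 + pvBit ch = 255 then []
       else Char.ofNat (acc * 2 + pvBit ch) :: pvDec 0 0 rest)
    else pvDec (acc * 2 + pvBit ch) (nbits + 1) rest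

theorem pv01 (x : Char) (h : (x == '0' || x == '1') = true) : x = '0' ∨ x = '1' := by
  simpa using h

-- A's accumulator loop produces exactly the decoded prefix of chunks before the terminator
theorem pvLoopA_eq (chunks : List (List Char)) (m : List Char) :
    pvLoopA chunks m = m ++ (chunks.takeWhile (fun c => c ≠ pvTerm)).map pvDecA := by
  induction chunks generalizing m with
  | nil => simp [pvLoopA]
  | cons c rest ih =>
    by_cases hc : c = pvTerm
    · subst hc
      rw [pvLoopA, if_pos rfl, List.takeWhile_cons]
      simp
    · rw [pvLoopA, if_neg hc, ih, List.takeWhile_cons]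
      simp [hc, pvDecA]

-- B's loop equals the output accumulator followed by pvDec of the remaining input
theorem pvLoopB_eq (cs : List Char) : ∀ acc nbits out,
    pvLoopB cs acc nbits out = out ++ pvDec acc nbits cs := by
  induction cs with
  | nil => intro acc nbits out; by_cases h : nbits = 0 <;> simp [pvLoopB, pvDec, h]
  | cons ch rest ih =>
    intro acc nbits out
    rw [pvLoopB, pvDec]
    by_cases h8 : nbits + 1 = 8
    · rw [if_pos h8, if_pos h8]
      by_cases h255 : acc * 2 + pvBit ch = 255
      · simp [h255]
      · simp [h255, ih]
    · rw [if_neg h8, if_neg h8, ih]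

-- chunk count / chunk extraction: A's range-and-slice chunking is pvChunkList
theorem pvChunkAux (cs : List Char) :
    (List.range ((cs.length + 7) / 8)).map (fun k => (cs.drop (8 * k)).take 8) = pvChunkList cs := by
  induction cs using pvChunkList.induct with
  | case1 => simp [pvChunkList]
  | case2 c cs ih =>
    rw [pvChunkList]
    have hlen : ((c :: cs).length + 7) / 8 = (((c :: cs).drop 8).length + 7) / 8 + 1 := by
      simp only [List.length_cons, List.length_drop]; omega
    rw [hlen, List.range_succ_eq_map, List.map_cons, List.map_map]
    refine congrArg₂ List.cons (by simp) ?_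
    rw [← ih]
    apply List.map_congr_left
    intro k _
    simp only [Function.comp_apply, List.drop_drop]
    congr 2
    omega

theorem pvChunks_eq (cs : List Char) :
    (PySem.List.pyRange 0 (cs.length : Int) 8).map
      (fun i => PySem.List.slice cs (some i) (some (i + 8))) = pvChunkList cs := by
  rw [PySem.List.pyRange_of_pos 0 _ (by norm_num), List.map_map, ← pvChunkAux]
  have hcount : (if (0:Int) < (cs.length : Int) then (((cs.length : Int) - 0 + 8 - 1) / 8).toNat else 0)
      = (cs.length + 7) / 8 := by
    by_cases h : 0 < cs.length
    · rw [if_pos (by exact_mod_cast h)]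
      omega
    · have h0 : cs.length = 0 := by omega
      simp [h0]
  rw [hcount]
  apply List.map_congr_left
  intro k _
  simp only [Function.comp_apply]
  have h1 : (0 : Int) + 8 * (k : Int) = ((8 * k : Nat) : Int) := by push_cast; ring
  have h2 : ((8 * k : Nat) : Int) + 8 = ((8 * k + 8 : Nat) : Int) := by push_cast; ring
  rw [h1, h2, PySem.List.slice_natCast]
  congr 1
  omega

-- pvDec from any mid-byte state, in terms of the chunk value pvPB
theorem pvDec_eq (cs : List Char) : ∀ acc nbits, nbits < 8 →
    pvDec acc nbits cs =
      if cs.length + nbits < 8 then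
        (if cs.length + nbits = 0 then [] else [Char.ofNat (pvPB acc cs)])
      else
        (if pvPB acc (cs.take (8 - nbits)) = 255 then []
         else Char.ofNat (pvPB acc (cs.take (8 - nbits))) :: pvDec 0 0 (cs.drop (8 - nbits))) := by
  induction cs with
  | nil =>
    intro acc nbits h
    simp only [pvDec, List.length_nil, Nat.zero_add, pvPB, List.foldl_nil]
    rw [if_pos h]
    by_cases h0 : nbits = 0 <;> simp [h0]
  | cons ch rest ih =>
    intro acc nbits h
    rw [pvDec]
    by_cases h8 : nbits + 1 = 8
    · rw [if_pos h8]
      have hn7 : nbits = 7 := by omega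
      subst hn7
      have hlen : ¬ ((ch :: rest).length + 7 < 8) := by simp
      rw [if_neg hlen]
      have htake : (ch :: rest).take (8 - 7) = [ch] := by norm_num
      rw [htake]
      have hdrop : (ch :: rest).drop (8 - 7) = rest := by norm_num
      rw [hdrop]
      simp [pvPB]
    · rw [if_neg h8, ih _ (nbits + 1) (by omega)]
      have hsum : rest.length + (nbits + 1) = (ch :: rest).length + nbits := by simp; omega
      rw [hsum]
      by_cases hlt : (ch :: rest).length + nbits < 8
      · rw [if_pos hlt, if_pos hlt]
        have : ¬ ((ch :: rest).length + nbits = 0) := by simp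
        rw [if_neg this, if_neg (by omega)]
        simp [pvPB]
      · rw [if_neg hlt, if_neg hlt]
        have htk : (ch :: rest).take (8 - nbits) = ch :: rest.take (8 - (nbits + 1)) := by
          have : 8 - nbits = (8 - (nbits + 1)) + 1 := by omega
          rw [this, List.take_succ_cons]
        have hdr : (ch :: rest).drop (8 - nbits) = rest.drop (8 - (nbits + 1)) := by
          have : 8 - nbits = (8 - (nbits + 1)) + 1 := by omega
          rw [this, List.drop_succ_cons]
        rw [htk, hdr]
        simp [pvPB]

theorem pvDec01 (c : List Char) (h1 : c.length ≤ 8)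
    (h01 : c.all (fun x => x == '0' || x == '1') = true) (hne : c ≠ []) :
    PySem.Int.ofCharsBase? c 2 = some ((pvPB 0 c : Nat) : Int) := by
  rcases c with _ | ⟨a, c⟩
  · exact absurd rfl hne
  simp only [List.all_cons, Bool.and_eq_true] at h01
  obtain ⟨ha, h01⟩ := h01
  rcases pv01 a ha with rfl | rfl <;>
  (
    rcases c with _ | ⟨a, c⟩
    · decide
    · simp only [List.all_cons, Bool.and_eq_true] at h01
      obtain ⟨ha, h01⟩ := h01
      rcases pv01 a ha with rfl | rfl <;>
      (
        rcases c with _ | ⟨a, c⟩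
        · decide
        · simp only [List.all_cons, Bool.and_eq_true] at h01
          obtain ⟨ha, h01⟩ := h01
          rcases pv01 a ha with rfl | rfl <;>
          (
            rcases c with _ | ⟨a, c⟩
            · decide
            · simp only [List.all_cons, Bool.and_eq_true] at h01
              obtain ⟨ha, h01⟩ := h01
              rcases pv01 a ha with rfl | rfl <;>
              (
                rcases c with _ | ⟨a, c⟩
                · decide
                · simp only [List.all_cons, Bool.and_eq_true] at h01
                  obtain ⟨ha, h01⟩ := h01
                  rcases pv01 a ha with rfl | rfl <;>
                  (
                    rcases c with _ | ⟨a, c⟩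
                    · decide
                    · simp only [List.all_cons, Bool.and_eq_true] at h01
                      obtain ⟨ha, h01⟩ := h01
                      rcases pv01 a ha with rfl | rfl <;>
                      (
                        rcases c with _ | ⟨a, c⟩
                        · decide
                        · simp only [List.all_cons, Bool.and_eq_true] at h01
                          obtain ⟨ha, h01⟩ := h01
                          rcases pv01 a ha with rfl | rfl <;>
                          (
                            rcases c with _ | ⟨a, c⟩
                            · decide
                            · simp only [List.all_cons, Bool.and_eq_true] at h01
                              obtain ⟨ha, h01⟩ := h01
                              rcases pv01 a ha with rfl | rfl <;>
                              (
                                rcases c with _ | ⟨a, c⟩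
                                · decide
                                · exfalso; simp only [List.length_cons] at h1; omega))))))))

theorem pvPB255 (c : List Char) (h1 : c.length = 8)
    (h01 : c.all (fun x => x == '0' || x == '1') = true) :
    (pvPB 0 c = 255 ↔ c = pvTerm) := by
  rcases c with _ | ⟨a, c⟩
  · exfalso; simp only [List.length_nil] at h1; omega
  · simp only [List.all_cons, Bool.and_eq_true] at h01
    obtain ⟨ha, h01⟩ := h01
    rcases pv01 a ha with rfl | rfl <;>
    (
      rcases c with _ | ⟨a, c⟩
      · exfalso; simp only [List.length_cons, List.length_nil] at h1; omega
      · simp only [List.all_cons, Bool.and_eq_true] at h01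
        obtain ⟨ha, h01⟩ := h01
        rcases pv01 a ha with rfl | rfl <;>
        (
          rcases c with _ | ⟨a, c⟩
          · exfalso; simp only [List.length_cons, List.length_nil] at h1; omega
          · simp only [List.all_cons, Bool.and_eq_true] at h01
            obtain ⟨ha, h01⟩ := h01
            rcases pv01 a ha with rfl | rfl <;>
            (
              rcases c with _ | ⟨a, c⟩
              · exfalso; simp only [List.length_cons, List.length_nil] at h1; omega
              · simp only [List.all_cons, Bool.and_eq_true] at h01
                obtain ⟨ha, h01⟩ := h01
                rcases pv01 a ha with rfl | rfl <;>
                (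
                  rcases c with _ | ⟨a, c⟩
                  · exfalso; simp only [List.length_cons, List.length_nil] at h1; omega
                  · simp only [List.all_cons, Bool.and_eq_true] at h01
                    obtain ⟨ha, h01⟩ := h01
                    rcases pv01 a ha with rfl | rfl <;>
                    (
                      rcases c with _ | ⟨a, c⟩
                      · exfalso; simp only [List.length_cons, List.length_nil] at h1; omega
                      · simp only [List.all_cons, Bool.and_eq_true] at h01
                        obtain ⟨ha, h01⟩ := h01
                        rcases pv01 a ha with rfl | rfl <;>
                        (
                          rcases c with _ | ⟨a, c⟩
                          · exfalso; simp only [List.length_cons, List.length_nil] at h1; omega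
                          · simp only [List.all_cons, Bool.and_eq_true] at h01
                            obtain ⟨ha, h01⟩ := h01
                            rcases pv01 a ha with rfl | rfl <;>
                            (
                              rcases c with _ | ⟨a, c⟩
                              · exfalso; simp only [List.length_cons, List.length_nil] at h1; omega
                              · simp only [List.all_cons, Bool.and_eq_true] at h01
                                obtain ⟨ha, h01⟩ := h01
                                rcases pv01 a ha with rfl | rfl <;>
                                (
                                  rcases c with _ | ⟨a, c⟩
                                  · decide
                                  · exfalso; simp only [List.length_cons] at h1; omega))))))))

theorem pvDecA_eq (c : List Char) (h1 : c.length ≤ 8)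
    (h01 : c.all (fun x => x == '0' || x == '1') = true) (hne : c ≠ []) :
    pvDecA c = Char.ofNat (pvPB 0 c) := by
  rw [pvDecA, pvDec01 c h1 h01 hne]
  simp

-- the bit machine agrees with chunk-wise decoding on all-binary input
theorem pvMain (cs : List Char)
    (h01 : (((pvChunkList cs).takeWhile (fun c => c ≠ pvTerm)).all
      (fun c => c.all (fun x => x == '0' || x == '1'))) = true) :
    pvDec 0 0 cs = ((pvChunkList cs).takeWhile (fun c => c ≠ pvTerm)).map pvDecA := by
  induction cs using pvChunkList.induct with
  | case1 => simp [pvDec, pvChunkList]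
  | case2 c cs ih =>
    rw [pvChunkList, pvDec_eq _ 0 0 (by omega)]
    simp only [Nat.add_zero, Nat.sub_zero]
    by_cases hterm : (c :: cs).take 8 = pvTerm
    · have hlen : ¬ ((c :: cs).length < 8) := by
        have h := congrArg List.length hterm
        rw [List.length_take] at h
        have h2 : pvTerm.length = 8 := rfl
        rw [h2] at h
        simp only [List.length_cons] at h ⊢
        omega
      rw [if_neg hlen, if_pos (by rw [hterm]; decide), List.takeWhile_cons]
      simp [hterm]
    · rw [pvChunkList, List.takeWhile_cons] at h01
      simp only [hterm, ne_eq, not_false_iff, decide_true, if_pos trivial, List.all_cons,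
        Bool.and_eq_true] at h01
      obtain ⟨hch, htail⟩ := h01
      rw [List.takeWhile_cons]
      simp only [hterm, ne_eq, not_false_iff, decide_true]
      rw [if_pos trivial, List.map_cons]
      by_cases hlt : (c :: cs).length < 8
      · rw [if_pos hlt, if_neg (by simp)]
        have htk : (c :: cs).take 8 = c :: cs := List.take_of_length_le (by omega)
        have hdr : (c :: cs).drop 8 = [] := List.drop_eq_nil_of_le (by omega)
        rw [htk] at hch
        rw [hdr, pvChunkList, List.takeWhile_nil, List.map_nil, htk,
          pvDecA_eq _ (by omega) hch (by simp)]
      · have hlen8 : ((c :: cs).take 8).length = 8 := by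
          rw [List.length_take]; omega
        have h255 : ¬ pvPB 0 ((c :: cs).take 8) = 255 := fun h =>
          hterm ((pvPB255 _ hlen8 hch).mp h)
        rw [if_neg hlt, if_neg h255,
          pvDecA_eq _ (by omega) hch (by intro he; rw [he] at hlen8; simp at hlen8),
          ih htail]

-- ===== VERDICT (by name: the statement is the Claim_ definition above) =====
theorem binary_to_text_spec : Claim_equal_binary_to_text := by
  intro binary _hdom hpre
  unfold Pre_binary_to_text at hpre
  rw [pvChunks_eq] at hpre
  unfold Spec_binary_to_text binary_to_text binary_to_text_alt
  dsimp only
  rw [pvChunks_eq, pvLoopA_eq, pvLoopB_eq, List.nil_append, List.nil_append, pvMain _ hpre]
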